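-- pv_equiv track=rewrite | github.com/aiazza/PersonalProjects | Interview_list_exercises.py | largest_from_list
-- ===== SOURCE A (Python) =====
-- def largest_from_list(num_list):
--     max_num = num_list[0]
--     if None in num_list:
--         return "ERROR"
--     else:
--         for num in num_list[1:]:
--             if num > max_num:
--                 max_num = num
--         return max_num
-- ===== SOURCE B (Python) =====
-- def largest_from_list(num_list):
--     if None in num_list:
--         return "ERROR"
--     return sorted(num_list)[-1]
-- ===== Notes on version B (the rewrite author's own statement) =====
-- stated objective: alternative
-- what changed: Replaces the manual running-max loop over num_list[1:] with sort-then-take-last (sorted(num_list)[-1]).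
import Mathlib
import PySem

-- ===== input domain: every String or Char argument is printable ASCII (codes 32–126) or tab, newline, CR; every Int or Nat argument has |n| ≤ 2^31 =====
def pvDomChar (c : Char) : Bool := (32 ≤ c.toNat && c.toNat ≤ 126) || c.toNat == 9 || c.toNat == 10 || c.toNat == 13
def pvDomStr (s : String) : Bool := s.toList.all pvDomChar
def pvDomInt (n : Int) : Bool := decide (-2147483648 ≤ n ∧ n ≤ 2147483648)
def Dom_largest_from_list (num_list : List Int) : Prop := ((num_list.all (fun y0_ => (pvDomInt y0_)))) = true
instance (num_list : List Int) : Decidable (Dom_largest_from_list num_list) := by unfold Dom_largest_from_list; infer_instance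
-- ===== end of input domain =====

-- B replaces A's running-max loop with sort-then-take-last; return values agree on every
-- non-empty list (both raise IndexError on []; the None branch is unreachable for int lists).

-- ===== PORT A =====
def largest_from_list (num_list : List Int) : Int :=
  match num_list with
  | [] => 0  -- num_list[0] raises IndexError here; excluded by Pre_
  | max_num :: _ =>
    -- for num in num_list[1:]: if num > max_num: max_num = num
    (PySem.List.slice num_list (some 1) none).foldl
      (fun max_num num => if num > max_num then num else max_num) max_num

-- ===== PORT B =====
def largest_from_list_alt (num_list : List Int) : Int :=
  -- sorted(num_list)[-1]; none = IndexError on [], excluded by Pre_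
  (PySem.List.pyGet? (PySem.List.sorted num_list (fun x => x) false) (-1)).getD 0

-- ===== PRECONDITION & SPEC =====
-- A raises IndexError (num_list[0]) on the empty list, and B's sorted([])[-1] raises too.
def Pre_largest_from_list (num_list : List Int) : Prop := num_list ≠ []
instance (num_list : List Int) : Decidable (Pre_largest_from_list num_list) := by unfold Pre_largest_from_list; infer_instance
def pvWitness_largest_from_list : List Int := ([3, -1, 7, 7, 2])
def Spec_largest_from_list (num_list : List Int) (out : Int) : Prop := out = largest_from_list_alt num_list
instance (num_list : List Int) (out : Int) : Decidable (Spec_largest_from_list num_list out) := by unfold Spec_largest_from_list; infer_instance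

-- ===== CLAIM (what is proved, stated in full; the proofs are below) =====
def Claim_equal_largest_from_list : Prop := ∀ (num_list : List Int), Dom_largest_from_list num_list → Pre_largest_from_list num_list → Spec_largest_from_list num_list (largest_from_list num_list)

-- ===== LEMMAS AND PROOFS =====

-- in a ≤-pairwise list, every member is ≤ the last element
theorem le_getLast_of_pairwise (ys : List Int) (hp : ys.Pairwise (· ≤ ·)) (h : ys ≠ []) :
    ∀ y ∈ ys, y ≤ ys.getLast h := by
  induction ys with
  | nil => intro y hy; cases hy
  | cons a t ih =>
    rcases List.pairwise_cons.1 hp with ⟨ha, ht⟩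
    intro y hy
    cases t with
    | nil => simp at hy; simp [hy]
    | cons b u =>
      rcases List.mem_cons.1 hy with hy | hy
      · have hb := ih ht (by simp) b (by simp)
        have hab : a ≤ b := ha b (by simp)
        rw [List.getLast_cons (by simp)]
        exact hy ▸ le_trans hab hb
      · rw [List.getLast_cons (by simp)]
        exact ih ht (by simp) y hy

theorem largest_from_list_spec : Claim_equal_largest_from_list := by
  intro num_list _ hpre
  unfold Spec_largest_from_list largest_from_list largest_from_list_alt
  match num_list, hpre with
  | h :: t, _ =>
    rw [PySem.List.slice_from_one]
    simp only [List.tail_cons]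
    -- A computes the running max
    have hfun : (fun (m n : Int) => if n > m then n else m) = max := by
      funext m n
      by_cases hlt : n > m
      · simp [hlt, max_eq_right (le_of_lt hlt)]
      · rw [not_lt] at hlt
        simp [not_lt.2 hlt, max_eq_left hlt]
    have hmaxA : t.foldl (fun m n => if n > m then n else m) h = t.foldl max h := by
      rw [hfun]
    set m := t.foldl max h with hm
    have hmmem : m ∈ h :: t := by
      rcases PySem.List.foldl_max_mem t h with h1 | h1
      · simp [hm, h1]
      · simp [hm, h1]
    have hmax : ∀ y ∈ h :: t, y ≤ m := by
      intro y hy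
      rcases List.mem_cons.1 hy with hy | hy
      · exact hy ▸ (PySem.List.le_foldl_max t h).1
      · exact (PySem.List.le_foldl_max t h).2 y hy
    -- B takes the last of the sorted list
    set ys := PySem.List.sorted (h :: t) (fun x => x) false with hys
    have hperm : ys.Perm (h :: t) := PySem.List.sorted_perm _ _ _
    have hne : ys ≠ [] := by
      intro hnil
      have : (h :: t) = [] := ((hnil ▸ hperm : List.Perm ([] : List Int) (h :: t)).symm).eq_nil
      simp at this
    have hpw : ys.Pairwise (· ≤ ·) := PySem.List.sorted_pairwise _ _
    rw [PySem.List.pyGet?_neg_one, List.getLast?_eq_some_getLast hne, Option.getD_some, hmaxA]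
    set l := ys.getLast hne with hl
    have hlmem : l ∈ h :: t := hperm.mem_iff.1 (List.getLast_mem hne)
    have hmys : m ∈ ys := hperm.mem_iff.2 hmmem
    exact le_antisymm (le_getLast_of_pairwise ys hpw hne m hmys) (hmax l hlmem)

-- ===== VERDICT (by name: the statement is the Claim_ definition above) =====
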